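-- pv_equiv track=rewrite | github.com/nroh555/BarcodeDetection | CS373_barcode_detection.py | computeErosion8Nbh5x5FlatSE
-- ===== SOURCE A (Python) =====
-- def createInitializedGreyscalePixelArray(image_width, image_height, initValue = 0):
--
--     new_array = [[initValue for x in range(image_width)] for y in range(image_height)]
--     return new_array
--
-- def computeErosion8Nbh5x5FlatSE(pixel_array, image_width, image_height):
--     output = createInitializedGreyscalePixelArray(image_width, image_height)
--     padded = createInitializedGreyscalePixelArray(image_width+4, image_height+4)
--     for x in range(image_height):
--         for y in range(image_width):
--             padded[x+2][y+2] = pixel_array[x][y]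
--
--     for x in range(2, image_height+2):
--         for y in range(2, image_width+2):
--             if (padded[x-2][y+2] > 0 and padded[x-2][y+1] > 0 and padded[x-2][y] > 0 and padded[x-2][y-1] > 0 and padded[x-2][y-2] > 0 and
--                 padded[x-1][y+2] > 0 and padded[x-1][y+1] > 0 and padded[x-1][y] > 0 and padded[x-1][y-1] > 0 and padded[x-1][y-2] > 0 and
--                 padded[x][y+2] > 0 and padded[x][y+1] > 0 and padded[x][y] > 0 and padded[x][y-1] > 0 and padded[x][y-2] > 0 and
--                 padded[x+1][y+2] > 0 and padded[x+1][y+1] > 0 and padded[x+1][y] > 0 and padded[x+1][y-1] > 0 and padded[x+1][y-2] > 0 and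
--                 padded[x+2][y+2] > 0 and padded[x+2][y+1] > 0 and padded[x+2][y] > 0 and padded[x+2][y-1] > 0 and padded[x+2][y-2] > 0):
--                 output[x-2][y-2] = 1
--     return output
-- ===== SOURCE B (Python) =====
-- def computeErosion8Nbh5x5FlatSE(pixel_array, image_width, image_height):
--     # Separable erosion: horizontal 5-window pass, then vertical 5-window pass.
--     h, w = image_height, image_width
--
--     def get(i, j):
--         if 0 <= i < h and 0 <= j < w:
--             return pixel_array[i][j]
--         return 0
--
--     horiz = [[1 if all(get(i, j + d) > 0 for d in range(-2, 3)) else 0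
--               for j in range(w)] for i in range(h)]
--
--     def hget(i, j):
--         if 0 <= i < h:
--             return horiz[i][j]
--         return 0
--
--     return [[1 if all(hget(i + d, j) > 0 for d in range(-2, 3)) else 0
--              for j in range(w)] for i in range(h)]
-- ===== Notes on version B (the rewrite author's own statement) =====
-- stated objective: alternative
-- what changed: Replaces the single pass that tests all 25 neighbours per pixel over an explicitly built zero-padded copy with a separable two-pass erosion (a horizontal 5-window pass producing an intermediate binary image, then a vertical 5-window pass), built directly with bounds-checked reads instead of padding.
import Mathlib
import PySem

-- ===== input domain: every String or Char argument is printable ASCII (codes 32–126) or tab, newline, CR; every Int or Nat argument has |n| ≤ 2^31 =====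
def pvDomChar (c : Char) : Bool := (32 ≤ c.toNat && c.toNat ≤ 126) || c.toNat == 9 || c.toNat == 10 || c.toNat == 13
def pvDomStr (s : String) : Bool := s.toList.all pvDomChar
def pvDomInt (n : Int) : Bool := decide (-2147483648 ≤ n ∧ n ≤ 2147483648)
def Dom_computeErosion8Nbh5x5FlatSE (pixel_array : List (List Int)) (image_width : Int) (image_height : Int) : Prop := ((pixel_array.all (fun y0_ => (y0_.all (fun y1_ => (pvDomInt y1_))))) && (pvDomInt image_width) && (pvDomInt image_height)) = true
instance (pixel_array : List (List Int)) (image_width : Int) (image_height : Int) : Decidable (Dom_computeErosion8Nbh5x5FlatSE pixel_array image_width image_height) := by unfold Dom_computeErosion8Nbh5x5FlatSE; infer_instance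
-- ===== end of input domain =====

-- B replaces A's 25-neighbour test over an explicitly built zero-padded copy by a separable
-- two-pass (horizontal then vertical 5-window) erosion with bounds-checked reads (objective: alternative algorithm).

-- ===== PORT A =====
-- helper: the double indexing 'm[i][j]' (indices are always in range where A evaluates it)
def pvGet2 (m : List (List Int)) (i j : Int) : Int :=
  PySem.List.pyGetD (PySem.List.pyGetD m i []) j 0

def createInitializedGreyscalePixelArray (image_width image_height initValue : Int) : List (List Int) :=
  (PySem.List.pyRange 0 image_height 1).map (fun _ =>
    (PySem.List.pyRange 0 image_width 1).map (fun _ => initValue))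

def pvCondA (p : List (List Int)) (x y : Int) : Bool :=
  decide (0 < pvGet2 p (x-2) (y+2)) &&
  decide (0 < pvGet2 p (x-2) (y+1)) &&
  decide (0 < pvGet2 p (x-2) (y)) &&
  decide (0 < pvGet2 p (x-2) (y-1)) &&
  decide (0 < pvGet2 p (x-2) (y-2)) &&
  decide (0 < pvGet2 p (x-1) (y+2)) &&
  decide (0 < pvGet2 p (x-1) (y+1)) &&
  decide (0 < pvGet2 p (x-1) (y)) &&
  decide (0 < pvGet2 p (x-1) (y-1)) &&
  decide (0 < pvGet2 p (x-1) (y-2)) &&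
  decide (0 < pvGet2 p (x) (y+2)) &&
  decide (0 < pvGet2 p (x) (y+1)) &&
  decide (0 < pvGet2 p (x) (y)) &&
  decide (0 < pvGet2 p (x) (y-1)) &&
  decide (0 < pvGet2 p (x) (y-2)) &&
  decide (0 < pvGet2 p (x+1) (y+2)) &&
  decide (0 < pvGet2 p (x+1) (y+1)) &&
  decide (0 < pvGet2 p (x+1) (y)) &&
  decide (0 < pvGet2 p (x+1) (y-1)) &&
  decide (0 < pvGet2 p (x+1) (y-2)) &&
  decide (0 < pvGet2 p (x+2) (y+2)) &&
  decide (0 < pvGet2 p (x+2) (y+1)) &&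
  decide (0 < pvGet2 p (x+2) (y)) &&
  decide (0 < pvGet2 p (x+2) (y-1)) &&
  decide (0 < pvGet2 p (x+2) (y-2))

def computeErosion8Nbh5x5FlatSE (pixel_array : List (List Int)) (image_width : Int) (image_height : Int) : List (List Int) :=
  let output := createInitializedGreyscalePixelArray image_width image_height 0
  let padded0 := createInitializedGreyscalePixelArray (image_width+4) (image_height+4) 0
  let padded := (PySem.List.pyRange 0 image_height 1).foldl (fun p x =>
      (PySem.List.pyRange 0 image_width 1).foldl (fun p y =>
        PySem.List.pySetD p (x+2)
          (PySem.List.pySetD (PySem.List.pyGetD p (x+2) []) (y+2) (pvGet2 pixel_array x y))) p) padded0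
  (PySem.List.pyRange 2 (image_height+2) 1).foldl (fun o x =>
    (PySem.List.pyRange 2 (image_width+2) 1).foldl (fun o y =>
      if pvCondA padded x y
      then PySem.List.pySetD o (x-2) (PySem.List.pySetD (PySem.List.pyGetD o (x-2) []) (y-2) 1)
      else o) o) output

-- ===== PORT B =====
-- helper 'get(i, j)': the input pixel with out-of-bounds reads as 0
def pvGetB (pixel_array : List (List Int)) (h w i j : Int) : Int :=
  if 0 ≤ i ∧ i < h ∧ 0 ≤ j ∧ j < w then
    PySem.List.pyGetD (PySem.List.pyGetD pixel_array i []) j 0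
  else 0

-- helper 'hget(i, j)': a row of the intermediate image, out-of-bounds rows as 0
def pvHGet (horiz : List (List Int)) (h i j : Int) : Int :=
  if 0 ≤ i ∧ i < h then PySem.List.pyGetD (PySem.List.pyGetD horiz i []) j 0 else 0

-- the intermediate image 'horiz' of Source B (horizontal 5-window pass)
def pvHorizM (pixel_array : List (List Int)) (image_width image_height : Int) : List (List Int) :=
  (PySem.List.pyRange 0 image_height 1).map (fun i =>
    (PySem.List.pyRange 0 image_width 1).map (fun j =>
      if (PySem.List.pyRange (-2) 3 1).all (fun d => decide (0 < pvGetB pixel_array image_height image_width i (j+d))) then (1:Int) else 0))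

def computeErosion8Nbh5x5FlatSE_alt (pixel_array : List (List Int)) (image_width : Int) (image_height : Int) : List (List Int) :=
  (PySem.List.pyRange 0 image_height 1).map (fun i =>
    (PySem.List.pyRange 0 image_width 1).map (fun j =>
      if (PySem.List.pyRange (-2) 3 1).all (fun d => decide (0 < pvHGet (pvHorizM pixel_array image_width image_height) image_height (i+d) j)) then (1:Int) else 0))

-- ===== PRECONDITION & SPEC =====
-- Pre_ excludes exactly the inputs where A raises an IndexError: positive claimed width and
-- height but pixel_array has fewer than image_height rows, or one of those rows is shorter than image_width.
def Pre_computeErosion8Nbh5x5FlatSE (pixel_array : List (List Int)) (image_width : Int) (image_height : Int) : Prop :=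
  0 < image_width → 0 < image_height →
    (image_height ≤ (pixel_array.length : Int) ∧
     ∀ r ∈ pixel_array.take image_height.toNat, image_width ≤ (r.length : Int))
instance (pixel_array : List (List Int)) (image_width : Int) (image_height : Int) : Decidable (Pre_computeErosion8Nbh5x5FlatSE pixel_array image_width image_height) := by unfold Pre_computeErosion8Nbh5x5FlatSE; infer_instance

def pvWitness_computeErosion8Nbh5x5FlatSE : List (List Int) × Int × Int := ([[1]], 1, 1)

def Spec_computeErosion8Nbh5x5FlatSE (pixel_array : List (List Int)) (image_width : Int) (image_height : Int) (out : List (List Int)) : Prop := out = computeErosion8Nbh5x5FlatSE_alt pixel_array image_width image_height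
instance (pixel_array : List (List Int)) (image_width : Int) (image_height : Int) (out : List (List Int)) : Decidable (Spec_computeErosion8Nbh5x5FlatSE pixel_array image_width image_height out) := by unfold Spec_computeErosion8Nbh5x5FlatSE; infer_instance

-- ===== CLAIM (what is proved, stated in full; the proofs are below) =====
def Claim_equal_computeErosion8Nbh5x5FlatSE : Prop := ∀ (pixel_array : List (List Int)) (image_width : Int) (image_height : Int), Dom_computeErosion8Nbh5x5FlatSE pixel_array image_width image_height → Pre_computeErosion8Nbh5x5FlatSE pixel_array image_width image_height → Spec_computeErosion8Nbh5x5FlatSE pixel_array image_width image_height (computeErosion8Nbh5x5FlatSE pixel_array image_width image_height)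

-- ===== LEMMAS AND PROOFS =====

theorem pv_set_getD_self {α : Type} (s : List α) (n : Nat) (d : α) :
    s.set n (s.getD n d) = s := by
  induction s generalizing n with
  | nil => rfl
  | cons a t ih =>
    cases n with
    | zero => rfl
    | succ m => simpa [List.getD] using ih m

theorem pv_pySetD_getD_self {α : Type} (s : List α) (i : Int) (d : α) (hi : 0 ≤ i) :
    PySem.List.pySetD s i (PySem.List.pyGetD s i d) = s := by
  rw [PySem.List.pySetD_of_nonneg _ _ hi]
  simp only [PySem.List.pyGetD, PySem.List.pyGet?_of_nonneg _ hi]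
  simpa [List.getD] using pv_set_getD_self s i.toNat d

-- collapsing a fold that repeatedly rewrites one fixed row of a matrix into one row update
theorem pv_collapse (bodyFull : List (List Int) → Int → List (List Int))
    (bodyRow : List Int → Int → List Int) (i : Int) (hi : 0 ≤ i)
    (hbody : ∀ o y, bodyFull o y = PySem.List.pySetD o i (bodyRow (PySem.List.pyGetD o i []) y)) :
    ∀ (l : List Int) (p : List (List Int)),
      l.foldl bodyFull p = PySem.List.pySetD p i (l.foldl bodyRow (PySem.List.pyGetD p i [])) := by
  intro l
  induction l with
  | nil => intro p; simpa using (pv_pySetD_getD_self p i [] hi).symm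
  | cons y t ih =>
    intro p
    simp only [List.foldl_cons]
    rw [ih (bodyFull p y), hbody p y]
    by_cases hlen : i.toNat < p.length
    · have hget : PySem.List.pyGetD
          (PySem.List.pySetD p i (bodyRow (PySem.List.pyGetD p i []) y)) i [] =
          bodyRow (PySem.List.pyGetD p i []) y := by
        rw [PySem.List.pySetD_of_nonneg _ _ hi]
        simp [PySem.List.pyGetD, PySem.List.pyGet?_of_nonneg _ hi, List.getElem?_set_self hlen]
      rw [hget, PySem.List.pySetD_of_nonneg _ _ hi, PySem.List.pySetD_of_nonneg _ _ hi,
        PySem.List.pySetD_of_nonneg _ _ hi, List.set_set]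
    · rw [not_lt] at hlen
      have hset : ∀ (v : List Int), p.set i.toNat v = p := fun v => List.set_eq_of_length_le hlen
      rw [PySem.List.pySetD_of_nonneg _ _ hi, PySem.List.pySetD_of_nonneg _ _ hi,
        PySem.List.pySetD_of_nonneg _ _ hi, hset, hset, hset]

-- a fold over range(a, a+k) that writes cell y+off exactly once, in increasing order
theorem pv_window {α : Type} (d : α) (body : List α → Int → List α) (F : Int → α → α) (a off : Int)
    (hbody : ∀ s y, a ≤ y → body s y = PySem.List.pySetD s (y+off) (F y (PySem.List.pyGetD s (y+off) d)))
    (h1 : 0 ≤ a + off) :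
    ∀ (k : Nat) (r : List α), a + k + off ≤ (r.length : Int) →
      (PySem.List.pyRange a (a+(k:Int)) 1).foldl body r
      = (PySem.List.pyRange 0 (r.length : Int) 1).map
          (fun j => if a+off ≤ j ∧ j < a+(k:Int)+off then F (j-off) (PySem.List.pyGetD r j d) else PySem.List.pyGetD r j d) := by
  intro k
  induction k with
  | zero =>
    intro r hr
    rw [show a + ((0:Nat):Int) = a from by simp, PySem.List.pyRange_one_eq_nil (le_refl a)]
    simp only [List.foldl_nil]
    have hcong : ∀ j ∈ PySem.List.pyRange 0 ((r.length:Int)),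
        (if a+off ≤ j ∧ j < a+off then F (j-off) (PySem.List.pyGetD r j d) else PySem.List.pyGetD r j d)
        = PySem.List.pyGetD r j d := by
      intro j _
      rw [if_neg (by omega)]
    rw [List.map_congr_left hcong]
    symm
    simpa using (PySem.List.map_pyGetD_pyRange_zero r d)
  | succ k ih =>
    intro r hr
    have hk : a + ((k:Nat):Int) + off ≤ (r.length:Int) := by push_cast at hr ⊢; omega
    have hsplit : PySem.List.pyRange a (a + ((k+1:Nat):Int)) = PySem.List.pyRange a (a+(k:Int)) ++ [a+(k:Int)] := by
      rw [show a + ((k+1:Nat):Int) = (a + (k:Int)) + 1 from by push_cast; ring]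
      exact PySem.List.pyRange_one_succ_right (by omega)
    rw [hsplit, List.foldl_append]
    simp only [List.foldl_cons, List.foldl_nil]
    rw [ih r hk, hbody _ _ (by omega)]
    have hidx0 : (0:Int) ≤ a + (k:Int) + off := by omega
    have hidxlt : a + (k:Int) + off < (r.length:Int) := by push_cast at hr; omega
    rw [PySem.List.pyGetD_map_pyRange_of_nonneg _ _ _ _ hidx0 hidxlt]
    rw [if_neg (by omega)]
    rw [PySem.List.pySetD_of_nonneg _ _ hidx0]
    apply List.ext_getElem
    · simp [PySem.List.length_pyRange_one]
    · intro m hm1 hm2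
      simp only [List.getElem_set, List.getElem_map, PySem.List.getElem_pyRange_one]
      by_cases hm : (a + (k:Int) + off).toNat = m
      · rw [if_pos hm]
        have hmi : (0:Int) + (m:Int) = a + (k:Int) + off := by omega
        rw [if_pos (by push_cast; omega)]
        rw [hmi, show a + (k:Int) + off - off = a + (k:Int) from by ring]
      · rw [if_neg hm]
        split_ifs with hc1 hc2 hc2 <;> first | rfl | (exfalso; push_cast at hc1 hc2; omega)

theorem pv_zget (n j : Int) : PySem.List.pyGetD ((PySem.List.pyRange 0 n 1).map (fun _ => (0:Int))) j 0 = 0 := by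
  rcases hg : PySem.List.pyGet? ((PySem.List.pyRange 0 n 1).map (fun _ => (0:Int))) j with _ | x
  · simp only [PySem.List.pyGetD, hg, Option.getD_none]
  · have hx := PySem.List.mem_of_pyGet?_eq_some _ hg
    simp only [List.mem_map] at hx
    obtain ⟨_, _, hx⟩ := hx
    simp only [PySem.List.pyGetD, hg, Option.getD_some, ← hx]


-- proof-side abbreviations
def pvZRow (n : Int) : List Int := (PySem.List.pyRange 0 n 1).map (fun _ => (0:Int))
def pvZMat (w h : Int) : List (List Int) := (PySem.List.pyRange 0 h 1).map (fun _ => pvZRow w)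
def pvPadM (pa : List (List Int)) (W H : Int) : List (List Int) :=
  (PySem.List.pyRange 0 (H+4) 1).map (fun i =>
    (PySem.List.pyRange 0 (W+4) 1).map (fun j => pvGetB pa H W (i-2) (j-2)))

theorem pv_createInit_eq (w h : Int) : createInitializedGreyscalePixelArray w h 0 = pvZMat w h := rfl

theorem pv_zget' (n j : Int) : PySem.List.pyGetD (pvZRow n) j 0 = 0 := pv_zget n j

theorem pvGetB_zero_row (pa : List (List Int)) (H W r c : Int) (h : ¬ (0 ≤ r ∧ r < H)) :
    pvGetB pa H W r c = 0 := by
  unfold pvGetB; rw [if_neg]; tauto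

-- the middle fill loop of A, one row
theorem pv_rowfill (pa : List (List Int)) (W x : Int) (hW : 0 < W) :
    (PySem.List.pyRange 0 W 1).foldl (fun r y => PySem.List.pySetD r (y+2) (pvGet2 pa x y)) (pvZRow (W+4))
    = (PySem.List.pyRange 0 (W+4) 1).map (fun j => if 2 ≤ j ∧ j < W+2 then pvGet2 pa x (j-2) else 0) := by
  have hlen : ((pvZRow (W+4)).length : Int) = W + 4 := by
    simp [pvZRow, PySem.List.length_pyRange_one]; omega
  rw [show PySem.List.pyRange 0 W 1 = PySem.List.pyRange 0 (0 + (W.toNat : Int)) 1 from by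
    rw [show (0:Int) + (W.toNat : Int) = W from by omega]]
  rw [pv_window 0 _ (fun y _ => pvGet2 pa x y) 0 2 (fun s y _ => rfl) (by omega) W.toNat (pvZRow (W+4))
    (by rw [hlen]; omega)]
  rw [hlen]
  apply List.map_congr_left
  intro j hj
  rw [PySem.List.mem_pyRange_one] at hj
  by_cases hin : 2 ≤ j ∧ j < W + 2
  · rw [if_pos (by push_cast; omega), if_pos hin]
  · rw [if_neg (by push_cast; omega), if_neg hin, pv_zget']

-- the whole middle fill loop of A
theorem pv_padfill (pa : List (List Int)) (W H : Int) (hW : 0 < W) (hH : 0 < H) :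
    (PySem.List.pyRange 0 H 1).foldl (fun p x =>
      (PySem.List.pyRange 0 W 1).foldl (fun p y =>
        PySem.List.pySetD p (x+2)
          (PySem.List.pySetD (PySem.List.pyGetD p (x+2) []) (y+2) (pvGet2 pa x y))) p)
      (pvZMat (W+4) (H+4))
    = pvPadM pa W H := by
  have hlen : ((pvZMat (W+4) (H+4)).length : Int) = H + 4 := by
    simp [pvZMat, PySem.List.length_pyRange_one]; omega
  rw [show PySem.List.pyRange 0 H 1 = PySem.List.pyRange 0 (0 + (H.toNat : Int)) 1 from by
    rw [show (0:Int) + (H.toNat : Int) = H from by omega]]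
  rw [pv_window ([]) _
    (fun x r => (PySem.List.pyRange 0 W 1).foldl (fun r y => PySem.List.pySetD r (y+2) (pvGet2 pa x y)) r)
    0 2 (fun s x _ => pv_collapse _ _ (x+2) (by omega) (fun o y => rfl) (PySem.List.pyRange 0 W 1) s)
    (by omega) H.toNat (pvZMat (W+4) (H+4)) (by rw [hlen]; omega)]
  rw [hlen]
  unfold pvPadM
  apply List.map_congr_left
  intro i hi
  rw [PySem.List.mem_pyRange_one] at hi
  have hrow : PySem.List.pyGetD (pvZMat (W+4) (H+4)) i [] = pvZRow (W+4) := by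
    unfold pvZMat
    exact PySem.List.pyGetD_map_pyRange_of_nonneg _ _ _ _ hi.1 (by omega)
  by_cases hire : 2 ≤ i ∧ i < H + 2
  · rw [if_pos (by push_cast; omega), hrow, pv_rowfill pa W (i-2) hW]
    apply List.map_congr_left
    intro j hj
    rw [PySem.List.mem_pyRange_one] at hj
    by_cases hjin : 2 ≤ j ∧ j < W + 2
    · rw [if_pos hjin]
      unfold pvGetB pvGet2
      rw [if_pos (by omega)]
    · have hz : pvGetB pa H W (i-2) (j-2) = 0 := by
        unfold pvGetB; rw [if_neg (by omega)]
      rw [if_neg hjin, hz]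
  · rw [if_neg (by push_cast; omega), hrow]
    unfold pvZRow
    apply List.map_congr_left
    intro j hj
    rw [pvGetB_zero_row pa H W _ _ (by omega)]


-- the output loop of A, one row
theorem pv_outrow (padded : List (List Int)) (W x : Int) (hW : 0 < W) :
    (PySem.List.pyRange 2 (W+2) 1).foldl
      (fun r y => if pvCondA padded x y then PySem.List.pySetD r (y-2) 1 else r) (pvZRow W)
    = (PySem.List.pyRange 0 W 1).map (fun j => if pvCondA padded x (j+2) then (1:Int) else 0) := by
  have hlen : ((pvZRow W).length : Int) = W := by
    simp [pvZRow, PySem.List.length_pyRange_one]; omega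
  have hbody : ∀ (s : List Int) (y : Int), 2 ≤ y →
      (if pvCondA padded x y then PySem.List.pySetD s (y-2) 1 else s)
      = PySem.List.pySetD s (y + (-2))
          ((fun y rv => if pvCondA padded x y then (1:Int) else rv) y (PySem.List.pyGetD s (y + (-2)) 0)) := by
    intro s y hy
    by_cases hc : pvCondA padded x y
    · simp only [hc, if_true]
      rw [show y + (-2) = y - 2 from by ring]
    · simp only [hc, Bool.false_eq_true, if_false]
      exact (pv_pySetD_getD_self s (y + (-2)) 0 (by omega)).symm
  rw [show PySem.List.pyRange 2 (W+2) 1 = PySem.List.pyRange 2 (2 + (W.toNat : Int)) 1 from by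
    rw [show (2:Int) + (W.toNat : Int) = W + 2 from by omega]]
  rw [pv_window 0 _ (fun y rv => if pvCondA padded x y then (1:Int) else rv)
    2 (-2) hbody (by omega) W.toNat (pvZRow W) (by rw [hlen]; omega)]
  rw [hlen]
  apply List.map_congr_left
  intro j hj
  rw [PySem.List.mem_pyRange_one] at hj
  rw [if_pos (by push_cast; omega), pv_zget']
  rw [show j - (-2) = j + 2 from by ring]

-- the whole output loop of A
theorem pv_outfill (padded : List (List Int)) (W H : Int) (hW : 0 < W) (hH : 0 < H) :
    (PySem.List.pyRange 2 (H+2) 1).foldl (fun o x =>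
      (PySem.List.pyRange 2 (W+2) 1).foldl (fun o y =>
        if pvCondA padded x y
        then PySem.List.pySetD o (x-2) (PySem.List.pySetD (PySem.List.pyGetD o (x-2) []) (y-2) 1)
        else o) o) (pvZMat W H)
    = (PySem.List.pyRange 0 H 1).map (fun i =>
        (PySem.List.pyRange 0 W 1).map (fun j => if pvCondA padded (i+2) (j+2) then (1:Int) else 0)) := by
  have hlen : ((pvZMat W H).length : Int) = H := by
    simp [pvZMat, PySem.List.length_pyRange_one]; omega
  have hbody : ∀ (s : List (List Int)) (x : Int), 2 ≤ x →
      (PySem.List.pyRange 2 (W+2) 1).foldl (fun o y =>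
        if pvCondA padded x y
        then PySem.List.pySetD o (x-2) (PySem.List.pySetD (PySem.List.pyGetD o (x-2) []) (y-2) 1)
        else o) s
      = PySem.List.pySetD s (x + (-2))
          ((fun x r => (PySem.List.pyRange 2 (W+2) 1).foldl
              (fun r y => if pvCondA padded x y then PySem.List.pySetD r (y-2) 1 else r) r) x
            (PySem.List.pyGetD s (x + (-2)) [])) := by
    intro s x hx
    rw [show x + (-2) = x - 2 from by ring]
    refine pv_collapse _ _ (x-2) (by omega) ?_ (PySem.List.pyRange 2 (W+2) 1) s
    intro o y
    by_cases hc : pvCondA padded x y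
    · simp only [hc, if_true]
    · simp only [hc, Bool.false_eq_true, if_false]
      exact (pv_pySetD_getD_self o (x - 2) [] (by omega)).symm
  rw [show PySem.List.pyRange 2 (H+2) 1 = PySem.List.pyRange 2 (2 + (H.toNat : Int)) 1 from by
    rw [show (2:Int) + (H.toNat : Int) = H + 2 from by omega]]
  rw [pv_window ([]) _
    (fun x r => (PySem.List.pyRange 2 (W+2) 1).foldl
      (fun r y => if pvCondA padded x y then PySem.List.pySetD r (y-2) 1 else r) r)
    2 (-2) hbody (by omega) H.toNat (pvZMat W H) (by rw [hlen]; omega)]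
  rw [hlen]
  apply List.map_congr_left
  intro i hi
  rw [PySem.List.mem_pyRange_one] at hi
  rw [if_pos (by push_cast; omega)]
  have hrow : PySem.List.pyGetD (pvZMat W H) i [] = pvZRow W := by
    unfold pvZMat
    exact PySem.List.pyGetD_map_pyRange_of_nonneg _ _ _ _ hi.1 (by omega)
  rw [hrow, pv_outrow padded W (i - (-2)) hW]
  rw [show i - (-2) = i + 2 from by ring]


theorem pv_hget (pa : List (List Int)) (W H r j : Int) (hj : 0 ≤ j ∧ j < W) :
    pvHGet (pvHorizM pa W H) H r j
    = if 0 ≤ r ∧ r < H then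
        (if (PySem.List.pyRange (-2) 3 1).all (fun d => decide (0 < pvGetB pa H W r (j+d)))
         then (1:Int) else 0)
      else 0 := by
  unfold pvHGet pvHorizM
  by_cases hr : 0 ≤ r ∧ r < H
  · rw [if_pos hr, if_pos hr,
      PySem.List.pyGetD_map_pyRange_of_nonneg _ _ _ _ hr.1 hr.2,
      PySem.List.pyGetD_map_pyRange_of_nonneg _ _ _ _ hj.1 hj.2]
  · rw [if_neg hr, if_neg hr]

theorem pv_groupIff (pa : List (List Int)) (W H r j : Int) (hj : 0 ≤ j ∧ j < W) :
    (0 < pvGetB pa H W r (j+2) ∧ 0 < pvGetB pa H W r (j+1) ∧ 0 < pvGetB pa H W r j ∧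
     0 < pvGetB pa H W r (j-1) ∧ 0 < pvGetB pa H W r (j-2))
    ↔ 0 < pvHGet (pvHorizM pa W H) H r j := by
  rw [pv_hget pa W H r j hj]
  by_cases hr : 0 ≤ r ∧ r < H
  · rw [if_pos hr]
    rw [show PySem.List.pyRange (-2) 3 1 = [-2,-1,0,1,2] from by decide]
    simp only [List.all_cons, List.all_nil, Bool.and_true, Bool.and_eq_true, decide_eq_true_eq]
    rw [show j + (-2) = j - 2 from by ring, show j + (-1) = j - 1 from by ring,
      show j + (0:Int) = j from by ring]
    constructor
    · intro h
      rw [if_pos ⟨h.2.2.2.2, h.2.2.2.1, h.2.2.1, h.2.1, h.1⟩]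
      omega
    · intro h
      by_cases hall : (0 < pvGetB pa H W r (j - 2) ∧ 0 < pvGetB pa H W r (j - 1) ∧
          0 < pvGetB pa H W r j ∧ 0 < pvGetB pa H W r (j + 1) ∧ 0 < pvGetB pa H W r (j + 2))
      · exact ⟨hall.2.2.2.2, hall.2.2.2.1, hall.2.2.1, hall.2.1, hall.1⟩
      · rw [if_neg hall] at h; omega
  · rw [if_neg hr]
    have hz : ∀ c, pvGetB pa H W r c = 0 := fun c => pvGetB_zero_row pa H W r c hr
    simp [hz]


theorem pv_condIff (pa : List (List Int)) (W H i j : Int) (hi : 0 ≤ i ∧ i < H) (hj : 0 ≤ j ∧ j < W) :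
    (pvCondA (pvPadM pa W H) (i+2) (j+2) = true)
    ↔ ((PySem.List.pyRange (-2) 3 1).all
        (fun d => decide (0 < pvHGet (pvHorizM pa W H) H (i+d) j)) = true) := by
  have hread : ∀ r c : Int, 0 ≤ r → r < H+4 → 0 ≤ c → c < W+4 →
      pvGet2 (pvPadM pa W H) r c = pvGetB pa H W (r-2) (c-2) := by
    intro r c h1 h2 h3 h4
    unfold pvGet2 pvPadM
    rw [PySem.List.pyGetD_map_pyRange_of_nonneg _ _ _ _ h1 h2,
      PySem.List.pyGetD_map_pyRange_of_nonneg _ _ _ _ h3 h4]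
  simp only [pvCondA, Bool.and_eq_true, decide_eq_true_eq]
  rw [hread (i+2-2) (j+2+2) (by omega) (by omega) (by omega) (by omega),
    hread (i+2-2) (j+2+1) (by omega) (by omega) (by omega) (by omega),
    hread (i+2-2) (j+2) (by omega) (by omega) (by omega) (by omega),
    hread (i+2-2) (j+2-1) (by omega) (by omega) (by omega) (by omega),
    hread (i+2-2) (j+2-2) (by omega) (by omega) (by omega) (by omega),
    hread (i+2-1) (j+2+2) (by omega) (by omega) (by omega) (by omega),
    hread (i+2-1) (j+2+1) (by omega) (by omega) (by omega) (by omega),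
    hread (i+2-1) (j+2) (by omega) (by omega) (by omega) (by omega),
    hread (i+2-1) (j+2-1) (by omega) (by omega) (by omega) (by omega),
    hread (i+2-1) (j+2-2) (by omega) (by omega) (by omega) (by omega),
    hread (i+2) (j+2+2) (by omega) (by omega) (by omega) (by omega),
    hread (i+2) (j+2+1) (by omega) (by omega) (by omega) (by omega),
    hread (i+2) (j+2) (by omega) (by omega) (by omega) (by omega),
    hread (i+2) (j+2-1) (by omega) (by omega) (by omega) (by omega),
    hread (i+2) (j+2-2) (by omega) (by omega) (by omega) (by omega),
    hread (i+2+1) (j+2+2) (by omega) (by omega) (by omega) (by omega),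
    hread (i+2+1) (j+2+1) (by omega) (by omega) (by omega) (by omega),
    hread (i+2+1) (j+2) (by omega) (by omega) (by omega) (by omega),
    hread (i+2+1) (j+2-1) (by omega) (by omega) (by omega) (by omega),
    hread (i+2+1) (j+2-2) (by omega) (by omega) (by omega) (by omega),
    hread (i+2+2) (j+2+2) (by omega) (by omega) (by omega) (by omega),
    hread (i+2+2) (j+2+1) (by omega) (by omega) (by omega) (by omega),
    hread (i+2+2) (j+2) (by omega) (by omega) (by omega) (by omega),
    hread (i+2+2) (j+2-1) (by omega) (by omega) (by omega) (by omega),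
    hread (i+2+2) (j+2-2) (by omega) (by omega) (by omega) (by omega)]
  rw [show PySem.List.pyRange (-2) 3 1 = [-2,-1,0,1,2] from by decide]
  simp only [List.all_cons, List.all_nil, Bool.and_true, Bool.and_eq_true, decide_eq_true_eq]
  rw [← pv_groupIff pa W H (i + -2) j hj, ← pv_groupIff pa W H (i + -1) j hj,
    ← pv_groupIff pa W H (i + 0) j hj, ← pv_groupIff pa W H (i + 1) j hj,
    ← pv_groupIff pa W H (i + 2) j hj]
  ring_nf
  tauto

-- ===== VERDICT (by name: the statement is the Claim_ definition above) =====
theorem computeErosion8Nbh5x5FlatSE_spec : Claim_equal_computeErosion8Nbh5x5FlatSE := by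
  intro pa W H _ _
  unfold Spec_computeErosion8Nbh5x5FlatSE
  by_cases hH : H ≤ 0
  · have h1 : PySem.List.pyRange 0 H 1 = [] := PySem.List.pyRange_one_eq_nil hH
    have h2 : PySem.List.pyRange 2 (H+2) 1 = [] := PySem.List.pyRange_one_eq_nil (by omega)
    simp [computeErosion8Nbh5x5FlatSE, computeErosion8Nbh5x5FlatSE_alt,
      createInitializedGreyscalePixelArray, h1, h2]
  · by_cases hW : W ≤ 0
    · have h1 : PySem.List.pyRange 0 W 1 = [] := PySem.List.pyRange_one_eq_nil hW
      have h2 : PySem.List.pyRange 2 (W+2) 1 = [] := PySem.List.pyRange_one_eq_nil (by omega)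
      simp [computeErosion8Nbh5x5FlatSE, computeErosion8Nbh5x5FlatSE_alt,
        createInitializedGreyscalePixelArray, pvHorizM, h1, h2]
    · rw [not_le] at hH hW
      show computeErosion8Nbh5x5FlatSE pa W H = computeErosion8Nbh5x5FlatSE_alt pa W H
      unfold computeErosion8Nbh5x5FlatSE
      rw [pv_createInit_eq, pv_createInit_eq]
      simp only []
      rw [pv_padfill pa W H hW hH,
        pv_outfill (pvPadM pa W H) W H hW hH]
      unfold computeErosion8Nbh5x5FlatSE_alt
      apply List.map_congr_left
      intro i hi
      rw [PySem.List.mem_pyRange_one] at hi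
      apply List.map_congr_left
      intro j hj
      rw [PySem.List.mem_pyRange_one] at hj
      exact if_congr (pv_condIff pa W H i j hi hj) rfl rfl
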